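-- pv_equiv track=rewrite | github.com/iofu728/ProgrammingCode | leetcode/5387.py | numberWays
-- ===== SOURCE A (Python) =====
-- from typing import List
--
-- from functools import reduce
--
-- def numberWays(hats: List[List[int]]) -> int:
--     N = len(hats)
--     hats = sorted(hats, key=lambda i: len(i))
--
--     def bfs(a):
--         if len(a) == 1:
--             return len(a[0])
--         len_a = [len(ii) for ii in a]
--         if 0 in len_a:
--             return 0
--         len_list = [jj for ii in a for jj in ii]
--         if len(set(len_list)) == len(len_list):
--             return reduce(lambda x, y: x * y, len_a)
--         res = []
--         for t in a[0]:
--             tmp = a[1:][:]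
--             tmp = [[jj for jj in ii if jj != t] for ii in tmp]
--             res.append(bfs(tmp))
--         return sum(res)
--
--     return bfs(hats)
-- ===== SOURCE B (Python) =====
-- from typing import List
--
--
-- def numberWays(hats: List[List[int]]) -> int:
--     # Iterative DP over people: dict from "used hat values still relevant for the
--     # remaining people" (as a sorted tuple) to the number of partial assignments.
--     future = {}                       # occurrence counts of each value in the not-yet-processed lists
--     for row in hats:
--         for v in row:
--             future[v] = future.get(v, 0) + 1
--     dp = {(): 1}
--     for row in hats:
--         for v in row:                 # row now belongs to the past
--             future[v] = future.get(v, 0) - 1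
--         ndp = {}
--         for used, c in dp.items():
--             for t in row:
--                 if t in used:
--                     continue
--                 key = tuple(v for v in sorted(used + (t,)) if future.get(v, 0) > 0)
--                 ndp[key] = ndp.get(key, 0) + c
--         dp = ndp
--     return sum(dp.values())
-- ===== Notes on version B (the rewrite author's own statement) =====
-- stated objective: alternative
-- what changed: A's branching recursion (sort by length, then for each hat of the first person rebuild all remaining lists with that hat removed and recurse) is replaced by one iterative pass over the people that maintains a dictionary mapping each set of used hat values still occurring in the remaining lists to the number of partial assignments, merging all branches that agree on those still-relevant values.
-- outside the precondition, e.g. on numberWays([]): A raises TypeError, B returns 1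
import Mathlib
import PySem

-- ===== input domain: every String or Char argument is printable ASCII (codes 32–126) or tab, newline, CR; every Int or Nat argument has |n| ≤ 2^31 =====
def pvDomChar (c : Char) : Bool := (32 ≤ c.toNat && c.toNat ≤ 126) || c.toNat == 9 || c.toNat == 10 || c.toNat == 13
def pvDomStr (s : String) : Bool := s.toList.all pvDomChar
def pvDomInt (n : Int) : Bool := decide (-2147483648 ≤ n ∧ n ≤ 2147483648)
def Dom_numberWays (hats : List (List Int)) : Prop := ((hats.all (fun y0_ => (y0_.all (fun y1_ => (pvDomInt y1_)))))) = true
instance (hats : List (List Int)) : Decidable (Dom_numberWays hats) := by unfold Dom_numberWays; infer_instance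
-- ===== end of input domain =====

-- B replaces A's branching recursion (which rebuilds the filtered lists for every chosen hat) by one
-- iterative pass over the people, maintaining a dictionary from "used hat values still occurring in the
-- remaining lists" to the number of partial assignments; equivalence of the RETURN value is proved.

-- ===== PORT A =====
-- bfs: literal port of A's inner recursion.  On a = [] Python's reduce(mul, []) raises TypeError;
-- that branch is unreachable under Pre_numberWays (hats ≠ []), the 0 returned there is a placeholder.
def bfs (a : List (List Int)) : Int :=
  match a with
  | [] => 0
  | [x] => (x.length : Int)
  | x :: y :: rest =>
      let len_a := (x :: y :: rest).map (fun ii => (ii.length : Int))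
      if (0:Int) ∈ len_a then 0
      else
        let len_list := (x :: y :: rest).flatten
        if (PySem.Set.ofList len_list).length = len_list.length then
          -- reduce(lambda x, y: x * y, len_a)
          match len_a with
          | [] => 0
          | z :: zs => zs.foldl (· * ·) z
        else
          ((x.map (fun t => bfs ((y :: rest).map (fun ii => ii.filter (fun jj => !(jj == t)))))).sum)
termination_by a.length
decreasing_by simp

def numberWays (hats : List (List Int)) : Int :=
  bfs (PySem.List.sorted hats (fun i => i.length) false)

-- ===== PORT B =====
def numberWays_alt (hats : List (List Int)) : Int :=
  let future0 : PySem.Dict Int Int :=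
    hats.foldl (fun d row => row.foldl (fun d v => d.insert v (d.getD v 0 + 1)) d) PySem.Dict.empty
  let st : PySem.Dict (List Int) Int × PySem.Dict Int Int :=
    hats.foldl (fun st row =>
      let fut := row.foldl (fun d v => d.insert v (d.getD v 0 - 1)) st.2
      let ndp := st.1.items.foldl (fun ndp uc =>
          row.foldl (fun ndp t =>
            if t ∈ uc.1 then ndp
            else
              let key := (PySem.List.sorted (uc.1 ++ [t]) (fun v => v) false).filter
                           (fun v => decide (fut.getD v 0 > 0))
              ndp.insert key (ndp.getD key 0 + uc.2)) ndp) PySem.Dict.empty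
      (ndp, fut)) ((PySem.Dict.empty : PySem.Dict (List Int) Int).insert [] 1, future0)
  st.1.values.sum

-- ===== PRECONDITION & SPEC =====
-- Pre_ excludes only hats = [], where A's reduce(mul, []) raises TypeError (B would return 1 there).
def Pre_numberWays (hats : List (List Int)) : Prop := hats ≠ []
instance (hats : List (List Int)) : Decidable (Pre_numberWays hats) := by unfold Pre_numberWays; infer_instance
def pvWitness_numberWays : List (List Int) := [[1, 2], [1]]

def Spec_numberWays (hats : List (List Int)) (out : Int) : Prop := out = numberWays_alt hats
instance (hats : List (List Int)) (out : Int) : Decidable (Spec_numberWays hats out) := by unfold Spec_numberWays; infer_instance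

-- ===== CLAIM (what is proved, stated in full; the proofs are below) =====
def Claim_equal_numberWays : Prop := ∀ (hats : List (List Int)), Dom_numberWays hats → Pre_numberWays hats → Spec_numberWays hats (numberWays hats)

-- ===== LEMMAS AND PROOFS =====

def NS (avoid : List Int) (a : List (List Int)) : Int :=
  match a with
  | [] => 1
  | h :: rest => (h.map (fun t => if t ∈ avoid then 0 else NS (t :: avoid) rest)).sum
termination_by a.length
decreasing_by simp

theorem ns_cons (avoid : List Int) (h : List Int) (rest : List (List Int)) :
    NS avoid (h :: rest) = (h.map (fun t => if t ∈ avoid then 0 else NS (t :: avoid) rest)).sum := by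
  rw [NS]

theorem ns_ext (a : List (List Int)) (s s' : List Int)
    (hss : ∀ v ∈ a.flatten, (v ∈ s ↔ v ∈ s')) : NS s a = NS s' a := by
  induction a generalizing s s' with
  | nil => simp [NS]
  | cons h rest ih =>
    rw [ns_cons, ns_cons]
    congr 1
    apply List.map_congr_left
    intro t ht
    have hmem : t ∈ (h :: rest).flatten := by simp; exact Or.inl ht
    have h1 := hss t hmem
    by_cases hts : t ∈ s
    · simp [hts, h1.mp hts]
    · have hts' : t ∉ s' := fun hx => hts (h1.mpr hx)
      simp only [hts, hts', if_false]
      apply ih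
      intro v hv
      have hv2 : v ∈ (h :: rest).flatten := by simp at hv ⊢; exact Or.inr hv
      simp only [List.mem_cons]
      exact or_congr Iff.rfl (hss v hv2)

theorem ns_zero_of_mem_nil (a : List (List Int)) (s : List Int) (h : [] ∈ a) : NS s a = 0 := by
  induction a generalizing s with
  | nil => simp at h
  | cons hd rest ih =>
    rw [ns_cons]
    rcases List.mem_cons.mp h with h1 | h1
    · subst h1; simp
    · have : ∀ t ∈ hd, (if t ∈ s then (0:Int) else NS (t :: s) rest) = 0 := by
        intro t ht
        by_cases hts : t ∈ s
        · simp [hts]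
        · simp [hts, ih _ h1]
      rw [List.map_congr_left this]
      simp

theorem ns_prod (a : List (List Int)) (s : List Int) (hnd : a.flatten.Nodup)
    (hs : ∀ v ∈ a.flatten, v ∉ s) :
    NS s a = (a.map (fun l => (l.length : Int))).prod := by
  induction a generalizing s with
  | nil => simp [NS]
  | cons h rest ih =>
    rw [ns_cons]
    simp only [List.flatten_cons, List.nodup_append] at hnd
    obtain ⟨hh, hr, hdisj⟩ := hnd
    have : ∀ t ∈ h, (if t ∈ s then (0:Int) else NS (t :: s) rest)
        = (rest.map (fun l => (l.length : Int))).prod := by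
      intro t ht
      have hts : t ∉ s := hs t (by simp [ht])
      rw [if_neg hts]
      apply ih _ hr
      intro v hv
      simp only [List.mem_cons]
      rintro (rfl | hvs)
      · exact hdisj _ ht _ hv rfl
      · exact hs v (by simp [hv]) hvs
    rw [List.map_congr_left this]
    rw [PySem.List.sum_map_const_int]
    simp

theorem sum_filter_map (p : Int → Bool) (f : Int → Int) (h : List Int) :
    ((h.filter p).map f).sum = (h.map (fun u => if p u then f u else 0)).sum := by
  induction h with
  | nil => simp
  | cons hd tl ih => by_cases hp : p hd <;> simp [hp, ih]

theorem ns_filter (a : List (List Int)) (s : List Int) (t : Int) :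
    NS s (a.map (fun ii => ii.filter (fun jj => !(jj == t)))) = NS (t :: s) a := by
  induction a generalizing s with
  | nil => simp [NS]
  | cons h rest ih =>
    simp only [List.map_cons]
    rw [ns_cons, ns_cons, sum_filter_map]
    congr 1
    apply List.map_congr_left
    intro u hu
    by_cases hut : u = t
    · simp [hut]
    · by_cases hus : u ∈ s
      · simp [hut, hus]
      · have hnts : u ∉ t :: s := by simp [hut, hus]
        have hb : (!(u == t)) = true := by simp [hut]
        rw [hb, if_pos rfl, if_neg hus, if_neg hnts, ih]
        apply ns_ext
        intro v hv
        simp only [List.mem_cons]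
        tauto

theorem swap_sum (x y : List Int) (F : Int → Int → Int) :
    (x.map (fun t => (y.map (fun u => F t u)).sum)).sum = (y.map (fun u => (x.map (fun t => F t u)).sum)).sum := by
  induction x with
  | nil => simp
  | cons hd tl ih =>
    simp only [List.map_cons, List.sum_cons, ih]
    rw [← PySem.List.sum_map_add_int]

theorem ns_two (s : List Int) (x y : List Int) (l : List (List Int)) :
    NS s (x :: y :: l) =
      (x.map (fun t => (y.map (fun u =>
        if t ∈ s ∨ u ∈ s ∨ u = t then 0 else NS (u :: t :: s) l)).sum)).sum := by
  rw [ns_cons]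
  apply congrArg
  apply List.map_congr_left
  intro t ht
  by_cases hts : t ∈ s
  · simp [hts]
  · rw [if_neg hts, ns_cons]
    apply congrArg
    apply List.map_congr_left
    intro u hu
    by_cases hc : u = t ∨ u ∈ s
    · have : u ∈ t :: s := by simp [List.mem_cons]; tauto
      have : t ∈ s ∨ u ∈ s ∨ u = t := by tauto
      simp_all
    · have h1 : u ∉ t :: s := by simp [List.mem_cons]; tauto
      have h2 : ¬(t ∈ s ∨ u ∈ s ∨ u = t) := by tauto
      rw [if_neg h1, if_neg h2]

theorem ns_swap (s : List Int) (x y : List Int) (l : List (List Int)) :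
    NS s (x :: y :: l) = NS s (y :: x :: l) := by
  rw [ns_two, ns_two, swap_sum]
  apply congrArg
  apply List.map_congr_left
  intro u _
  apply congrArg
  apply List.map_congr_left
  intro t _
  by_cases hc : t ∈ s ∨ u ∈ s ∨ u = t
  · have hc' : u ∈ s ∨ t ∈ s ∨ t = u := by tauto
    rw [if_pos hc, if_pos hc']
  · have hc' : ¬(u ∈ s ∨ t ∈ s ∨ t = u) := by tauto
    rw [if_neg hc, if_neg hc']
    apply ns_ext
    intro v _
    simp only [List.mem_cons]
    tauto

theorem ns_perm (a b : List (List Int)) (hp : a.Perm b) (s : List Int) : NS s a = NS s b := by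
  induction hp generalizing s with
  | nil => rfl
  | cons x _ ih =>
    rw [ns_cons, ns_cons]
    apply congrArg
    apply List.map_congr_left
    intro t _
    by_cases hts : t ∈ s
    · simp [hts]
    · rw [if_neg hts, if_neg hts, ih]
  | swap x y l => exact ns_swap s y x l
  | trans _ _ ih1 ih2 => rw [ih1, ih2]

theorem setlen_eq_iff (xs : List Int) : (PySem.Set.ofList xs).length = xs.length ↔ xs.Nodup := by
  induction xs with
  | nil => simp [PySem.Set.ofList]
  | cons x xs ih =>
    rw [PySem.Set.ofList_cons]
    simp only [PySem.Set.discard, List.length_cons, List.nodup_cons]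
    have hle1 : ((PySem.Set.ofList xs).filter (fun y => !y == x)).length ≤ (PySem.Set.ofList xs).length :=
      List.length_filter_le _ _
    have hle2 : (PySem.Set.ofList xs).length ≤ xs.length := PySem.Set.length_ofList_le xs
    constructor
    · intro h
      have heq : ((PySem.Set.ofList xs).filter (fun y => !y == x)).length = (PySem.Set.ofList xs).length := by omega
      have hof : (PySem.Set.ofList xs).length = xs.length := by omega
      have hall := List.length_filter_eq_length_iff.mp heq
      refine ⟨fun hx => ?_, ih.mp hof⟩
      have := hall x ((PySem.Set.mem_ofList xs x).mpr hx)
      simp at this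
    · rintro ⟨hx, hnd⟩
      rw [PySem.Set.ofList_eq_self_of_nodup xs hnd]
      rw [List.filter_eq_self.mpr (fun a ha => by simp; exact fun h => hx (h ▸ ha))]

theorem bfs_eq_ns (a : List (List Int)) (ha : a ≠ []) : bfs a = NS [] a := by
  induction a using bfs.induct with
  | case1 => exact absurd rfl ha
  | case2 x =>
    rw [bfs, ns_cons]
    simp [NS]
  | case3 x y rest len_a h0 =>
    rw [bfs, if_pos h0, ns_zero_of_mem_nil]
    have h0' : (0:Int) ∈ (x :: y :: rest).map (fun ii => (ii.length : Int)) := h0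
    simp only [List.mem_map] at h0'
    obtain ⟨ii, hii, hlen⟩ := h0'
    have : ii = [] := by
      cases ii with
      | nil => rfl
      | cons a b => exfalso; simp at hlen; omega
    exact this ▸ hii
  | case4 x y rest len_a h0 len_list hnd hnil =>
    have : (x :: y :: rest).map (fun ii => (ii.length : Int)) = [] := hnil
    simp at this
  | case5 x y rest len_a h0 len_list hnd z zs hcons =>
    have hca : (x :: y :: rest).map (fun ii => (ii.length : Int)) = z :: zs := hcons
    rw [bfs, if_neg h0, if_pos hnd, hca]
    have hmatch : (match z :: zs with | [] => (0:Int) | z :: zs => List.foldl (fun a b => a * b) z zs) = zs.foldl (· * ·) z := rfl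
    rw [hmatch]
    have hprod : zs.foldl (· * ·) z = (z :: zs).prod := by simp [List.prod_eq_foldl]
    rw [hprod, ← hca, ns_prod]
    · exact (setlen_eq_iff _).mp hnd
    · simp
  | case6 x y rest len_a h0 len_list hnd ih =>
    rw [bfs, if_neg h0, if_neg hnd, ns_cons]
    apply congrArg
    apply List.map_congr_left
    intro t ht
    rw [ih t, ns_filter]
    · simp
    · simp

def wt (d : PySem.Dict (List Int) Int) (f : List Int → Int) : Int :=
  (d.items.map (fun q => q.2 * f q.1)).sum

theorem dec_getD (h : List Int) (d : PySem.Dict Int Int) (v : Int) :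
    (h.foldl (fun d v => d.insert v (d.getD v 0 - 1)) d).getD v 0 = d.getD v 0 - h.count v := by
  induction h generalizing d with
  | nil => simp
  | cons x xs ih =>
    rw [List.foldl_cons, ih, PySem.Dict.getD_insert]
    by_cases hv : v = x <;> simp [hv, List.count_cons] <;> omega

theorem cnt_getD (rows : List (List Int)) (d : PySem.Dict Int Int) (v : Int) :
    (rows.foldl (fun d row => row.foldl (fun d v => d.insert v (d.getD v 0 + 1)) d) d).getD v 0
      = d.getD v 0 + rows.flatten.count v := by
  induction rows generalizing d with
  | nil => simp
  | cons r rs ih =>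
    rw [List.foldl_cons, ih, PySem.Dict.getD_foldl_insert_add_one]
    simp [List.count_append]
    omega

theorem sum_update_one (l : List (List Int)) (hnd : l.Nodup) (k : List Int) (hk : k ∈ l)
    (f g : List Int → Int) (hfg : ∀ x ∈ l, x ≠ k → f x = g x) :
    (l.map g).sum = (l.map f).sum - f k + g k := by
  induction l with
  | nil => simp at hk
  | cons x xs ih =>
    simp only [List.nodup_cons] at hnd
    rcases List.mem_cons.mp hk with rfl | hk'
    · have : ∀ y ∈ xs, g y = f y := fun y hy => (hfg y (List.mem_cons_of_mem _ hy) (fun h => hnd.1 (h ▸ hy))).symm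
      simp only [List.map_cons, List.sum_cons]
      rw [List.map_congr_left this]
      ring
    · have hxk : x ≠ k := fun h => hnd.1 (h ▸ hk')
      simp only [List.map_cons, List.sum_cons]
      rw [ih hnd.2 hk' (fun y hy hyk => hfg y (List.mem_cons_of_mem _ hy) hyk), hfg x List.mem_cons_self hxk]
      ring

theorem wt_eq_keys (d : PySem.Dict (List Int) Int) (hnd : d.keys.Nodup) (f : List Int → Int) :
    wt d f = (d.keys.map (fun k => d.getD k 0 * f k)).sum := by
  unfold wt
  rw [PySem.Dict.items_eq_map_keys d hnd 0, List.map_map]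
  rfl

theorem wt_insert (d : PySem.Dict (List Int) Int) (hnd : d.keys.Nodup) (k : List Int) (c : Int)
    (f : List Int → Int) :
    wt (d.insert k (d.getD k 0 + c)) f = wt d f + c * f k := by
  by_cases hc : d.contains k
  · rw [wt_eq_keys _ (PySem.Dict.nodup_keys_insert d k _ hnd) f, wt_eq_keys d hnd f,
      PySem.Dict.keys_insert_of_contains d _ hc]
    have hk : k ∈ d.keys := (PySem.Dict.contains_iff_mem_keys d k).mp hc
    rw [sum_update_one d.keys hnd k hk _ _ (fun x _ hxk => by rw [PySem.Dict.getD_insert, if_neg hxk])]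
    rw [PySem.Dict.getD_insert, if_pos rfl]
    ring
  · unfold wt
    rw [PySem.Dict.items_insert_of_not_contains d _ (by simpa using hc)]
    rw [PySem.Dict.getD_of_not_contains d 0 (by simpa using hc)]
    simp

theorem inner_fold (h : List Int) (s : List Int) (c : Int) (K : Int → List Int)
    (f : List Int → Int) :
    ∀ (nd : PySem.Dict (List Int) Int), nd.keys.Nodup →
      (h.foldl (fun nd t => if t ∈ s then nd else nd.insert (K t) (nd.getD (K t) 0 + c)) nd).keys.Nodup ∧
      wt (h.foldl (fun nd t => if t ∈ s then nd else nd.insert (K t) (nd.getD (K t) 0 + c)) nd) f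
        = wt nd f + (h.map (fun t => if t ∈ s then 0 else c * f (K t))).sum := by
  induction h with
  | nil => intro nd hnd; simp [hnd]
  | cons t ts ih =>
    intro nd hnd
    rw [List.foldl_cons]
    by_cases hts : t ∈ s
    · rw [if_pos hts]
      obtain ⟨h1, h2⟩ := ih nd hnd
      refine ⟨h1, ?_⟩
      rw [h2]
      simp [hts]
    · rw [if_neg hts]
      obtain ⟨h1, h2⟩ := ih _ (PySem.Dict.nodup_keys_insert nd (K t) _ hnd)
      refine ⟨h1, ?_⟩
      rw [h2, wt_insert nd hnd (K t) c f]
      simp [hts]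
      ring

theorem outer_fold (pairs : List (List Int × Int)) (h : List Int) (K : List Int → Int → List Int)
    (f : List Int → Int) :
    ∀ (nd : PySem.Dict (List Int) Int), nd.keys.Nodup →
      (pairs.foldl (fun nd uc => h.foldl (fun nd t => if t ∈ uc.1 then nd else nd.insert (K uc.1 t) (nd.getD (K uc.1 t) 0 + uc.2)) nd) nd).keys.Nodup ∧
      wt (pairs.foldl (fun nd uc => h.foldl (fun nd t => if t ∈ uc.1 then nd else nd.insert (K uc.1 t) (nd.getD (K uc.1 t) 0 + uc.2)) nd) nd) f
        = wt nd f + (pairs.map (fun uc => (h.map (fun t => if t ∈ uc.1 then 0 else uc.2 * f (K uc.1 t))).sum)).sum := by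
  induction pairs with
  | nil => intro nd hnd; simp [hnd]
  | cons p ps ih =>
    intro nd hnd
    rw [List.foldl_cons]
    obtain ⟨h1, h2⟩ := inner_fold h p.1 p.2 (K p.1) f nd hnd
    obtain ⟨h3, h4⟩ := ih _ h1
    refine ⟨h3, ?_⟩
    rw [h4, h2]
    simp
    ring

theorem pair_term (h : List Int) (rest : List (List Int)) (fut : PySem.Dict Int Int)
    (hfut : ∀ v, fut.getD v 0 = (rest.flatten.count v : Int)) (s : List Int) (c : Int) :
    (h.map (fun t => if t ∈ s then 0 else
        c * NS ((PySem.List.sorted (s ++ [t]) (fun v => v) false).filter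
                  (fun v => decide (fut.getD v 0 > 0))) rest)).sum
      = c * NS s (h :: rest) := by
  rw [ns_cons, ← List.sum_map_mul_left]
  congr 1
  apply List.map_congr_left
  intro t _
  by_cases hts : t ∈ s
  · simp [hts]
  · rw [if_neg hts, if_neg hts]
    congr 1
    apply ns_ext
    intro v hv
    have hc : fut.getD v 0 > 0 := by
      rw [hfut v]
      have := List.count_pos_iff.mpr hv
      omega
    simp only [List.mem_filter, PySem.List.mem_sorted, List.mem_append, List.mem_cons,
      hc, decide_true, and_true]
    tauto

theorem alt_loop (rest : List (List Int)) :
    ∀ (dp : PySem.Dict (List Int) Int) (fut : PySem.Dict Int Int),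
      dp.keys.Nodup → (∀ v, fut.getD v 0 = (rest.flatten.count v : Int)) →
      ((rest.foldl (fun st row =>
          let fut := row.foldl (fun d v => d.insert v (d.getD v 0 - 1)) st.2
          let ndp := st.1.items.foldl (fun ndp uc =>
              row.foldl (fun ndp t =>
                if t ∈ uc.1 then ndp
                else
                  let key := (PySem.List.sorted (uc.1 ++ [t]) (fun v => v) false).filter
                               (fun v => decide (fut.getD v 0 > 0))
                  ndp.insert key (ndp.getD key 0 + uc.2)) ndp) PySem.Dict.empty
          (ndp, fut)) (dp, fut)).1.values.sum)
        = wt dp (fun s => NS s rest) := by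
  induction rest with
  | nil =>
    intro dp fut hnd _
    simp only [List.foldl_nil]
    unfold wt
    simp only [PySem.Dict.values]
    refine congrArg List.sum (List.map_congr_left ?_)
    intro q _
    simp [NS]
  | cons h rest ih =>
    intro dp fut hnd hfut
    rw [List.foldl_cons]
    simp only []
    set fut' := h.foldl (fun d v => d.insert v (d.getD v 0 - 1)) fut with hfut'
    have hfutinv : ∀ v, fut'.getD v 0 = (rest.flatten.count v : Int) := by
      intro v
      rw [hfut', dec_getD, hfut v]
      simp [List.count_append]
    obtain ⟨hnd2, hwt⟩ := outer_fold dp.items h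
      (fun s t => (PySem.List.sorted (s ++ [t]) (fun v => v) false).filter
                    (fun v => decide (fut'.getD v 0 > 0)))
      (fun s => NS s rest) PySem.Dict.empty (by simp)
    rw [ih _ _ hnd2 hfutinv, hwt]
    have hempty : wt PySem.Dict.empty (fun s => NS s rest) = 0 := rfl
    rw [hempty, zero_add]
    unfold wt
    apply congrArg
    apply List.map_congr_left
    intro uc _
    exact pair_term h rest fut' hfutinv uc.1 uc.2

theorem alt_eq_ns (hats : List (List Int)) : numberWays_alt hats = NS [] hats := by
  unfold numberWays_alt
  simp only []
  rw [alt_loop hats ((PySem.Dict.empty : PySem.Dict (List Int) Int).insert [] 1) _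
    (PySem.Dict.nodup_keys_insert _ _ _ (by simp))
    (fun v => by rw [cnt_getD]; simp)]
  unfold wt
  rw [PySem.Dict.items_insert_of_not_contains _ _ (by simp)]
  have hemp : (PySem.Dict.empty : PySem.Dict (List Int) Int).items = [] := rfl
  simp [hemp]

-- ===== VERDICT (by name: the statement is the Claim_ definition above) =====
theorem numberWays_spec : Claim_equal_numberWays := by
  intro hats _ hpre
  unfold Spec_numberWays numberWays
  rw [alt_eq_ns, bfs_eq_ns _ (by
    intro hnil
    exact hpre (by simpa [PySem.List.sorted_eq_nil_iff] using hnil)),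
    ns_perm _ hats (PySem.List.sorted_perm hats (fun i => i.length) false)]
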